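-- pv_equiv track=rewrite | github.com/khuonglnd724/HTGTTM | src/modules/lane_detector.py | group_lines
-- ===== SOURCE A (Python) =====
-- from typing import List, Tuple, Dict
--
-- def group_lines(lines: List[Tuple], image_width: int) -> List[List[Tuple]]:
--     """
--     Group detected lines into lanes
--
--     Args:
--         lines: List of detected lines
--         image_width: Width of image
--
--     Returns:
--         Grouped lines by lane
--     """
--     if not lines:
--         return []
--
--     # Sort lines by x coordinate
--     lines_sorted = sorted(lines, key=lambda l: (l[0] + l[2]) / 2)
--
--     lanes = []
--     current_lane = [lines_sorted[0]]
--
--     for i in range(1, len(lines_sorted)):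
--         line = lines_sorted[i]
--         prev_line = lines_sorted[i - 1]
--
--         # Calculate distance between line centers
--         curr_x = (line[0] + line[2]) / 2
--         prev_x = (prev_line[0] + prev_line[2]) / 2
--         distance = abs(curr_x - prev_x)
--
--         if distance < image_width / 8:  # Group if close
--             current_lane.append(line)
--         else:
--             lanes.append(current_lane)
--             current_lane = [line]
--
--     lanes.append(current_lane)
--     return lanes
-- ===== SOURCE B (Python) =====
-- def group_lines(lines, image_width):
--     """Group detected lines into lanes (phase-split rewrite: precompute break
--     flags between consecutive sorted lines, then assemble lanes back-to-front)."""
--     if not lines: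
--         return []
--     s = sorted(lines, key=lambda l: (l[0] + l[2]) / 2)
--     thr = image_width / 8
--     # breaks[i] == True  <=>  a new lane starts right after s[i]
--     breaks = [abs((b[0] + b[2]) / 2 - (a[0] + a[2]) / 2) >= thr
--               for a, b in zip(s, s[1:])] + [True]
--     lanes = []
--     for line, brk in reversed(list(zip(s, breaks))):
--         if brk:
--             lanes = [[line]] + lanes
--         else:
--             lanes[0] = [line] + lanes[0]
--     return lanes
-- ===== Notes on version B (the rewrite author's own statement) =====
-- stated objective: alternative
-- what changed: A grows a current_lane inside one forward loop that appends/flushes as it goes; B splits the work into two phases: it precomputes a list of break flags between consecutive sorted lines, then assembles the lanes in a single back-to-front pass that prepends each line either as a new lane or into the head lane.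
import Mathlib
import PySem

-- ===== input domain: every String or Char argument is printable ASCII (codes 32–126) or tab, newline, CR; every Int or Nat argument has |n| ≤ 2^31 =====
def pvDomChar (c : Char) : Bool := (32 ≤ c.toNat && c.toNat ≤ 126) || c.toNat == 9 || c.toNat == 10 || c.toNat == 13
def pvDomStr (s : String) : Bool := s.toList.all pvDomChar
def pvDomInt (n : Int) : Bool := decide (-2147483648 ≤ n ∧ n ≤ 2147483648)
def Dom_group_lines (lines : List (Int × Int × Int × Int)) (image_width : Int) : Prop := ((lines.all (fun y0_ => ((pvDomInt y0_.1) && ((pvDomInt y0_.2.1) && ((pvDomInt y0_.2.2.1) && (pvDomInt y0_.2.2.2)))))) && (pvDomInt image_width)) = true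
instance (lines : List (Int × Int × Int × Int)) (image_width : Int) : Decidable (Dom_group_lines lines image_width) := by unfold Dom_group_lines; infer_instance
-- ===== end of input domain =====

-- B splits the work into two phases — precompute the break flags between consecutive sorted
-- lines, then assemble the lanes back-to-front — instead of growing a current lane forward;
-- same return value (objective: alternative decomposition).

-- ===== PORT A =====
-- Python computes centers and the threshold in float; for |ints| ≤ 2^31 every value and
-- comparison involved is exact in binary floating point, so ℚ arithmetic is an exact port.
def pvCenter (l : Int × Int × Int × Int) : ℚ := ((l.1 : ℚ) + (l.2.2.1 : ℚ)) / 2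

def group_lines (lines : List (Int × Int × Int × Int)) (image_width : Int) : List (List (Int × Int × Int × Int)) :=
  if lines = [] then []
  else
    let lines_sorted := PySem.List.sorted lines pvCenter
    let st := (PySem.List.pyRange 1 (lines_sorted.length : Int) 1).foldl
      (fun (st : List (List (Int × Int × Int × Int)) × List (Int × Int × Int × Int)) i =>
        let line := PySem.List.pyGetD lines_sorted i (0, 0, 0, 0)
        let prev_line := PySem.List.pyGetD lines_sorted (i - 1) (0, 0, 0, 0)
        let distance := |pvCenter line - pvCenter prev_line|
        if distance < (image_width : ℚ) / 8 then (st.1, st.2 ++ [line])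
        else (st.1 ++ [st.2], [line]))
      ([], [PySem.List.pyGetD lines_sorted 0 (0, 0, 0, 0)])
    st.1 ++ [st.2]

-- ===== PORT B =====
def pvBrk (image_width : Int) (a b : Int × Int × Int × Int) : Bool :=
  decide ((image_width : ℚ) / 8 ≤ |pvCenter b - pvCenter a|)

def group_lines_alt (lines : List (Int × Int × Int × Int)) (image_width : Int) : List (List (Int × Int × Int × Int)) :=
  if lines = [] then []
  else
    let s := PySem.List.sorted lines pvCenter
    -- breaks[i] = True  <=>  a new lane starts right after s[i]
    let breaks := (s.zip s.tail).map (fun p => pvBrk image_width p.1 p.2) ++ [true]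
    -- reversed forward loop prepending into `lanes` = foldr
    (s.zip breaks).foldr
      (fun p lanes =>
        if p.2 then [p.1] :: lanes
        else match lanes with
          | g :: gs => (p.1 :: g) :: gs
          | [] => [[p.1]])
      []

-- ===== PRECONDITION & SPEC =====
def Spec_group_lines (lines : List (Int × Int × Int × Int)) (image_width : Int) (out : List (List (Int × Int × Int × Int))) : Prop := out = group_lines_alt lines image_width
instance (lines : List (Int × Int × Int × Int)) (image_width : Int) (out : List (List (Int × Int × Int × Int))) : Decidable (Spec_group_lines lines image_width out) := by unfold Spec_group_lines; infer_instance

-- ===== CLAIM (what is proved, stated in full; the proofs are below) =====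
def Claim_equal_group_lines : Prop := ∀ (lines : List (Int × Int × Int × Int)) (image_width : Int), Dom_group_lines lines image_width → Spec_group_lines lines image_width (group_lines lines image_width)

-- ===== LEMMAS AND PROOFS =====

-- canonical forward grouping recursion both ports are reduced to
def pvGo (w : Int) : (Int × Int × Int × Int) → List (Int × Int × Int × Int) → List (Int × Int × Int × Int) → List (List (Int × Int × Int × Int))
  | _, cur, [] => [cur]
  | prev, cur, y :: ys =>
      if pvBrk w prev y then cur :: pvGo w y [y] ys else pvGo w y (cur ++ [y]) ys

lemma pv_map_range (s : List (Int × Int × Int × Int)) (d : Int × Int × Int × Int) :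
    (PySem.List.pyRange 1 (s.length : Int) 1).map
      (fun i => (PySem.List.pyGetD s (i - 1) d, PySem.List.pyGetD s i d)) = s.zip s.tail := by
  apply List.ext_getElem
  · simp [PySem.List.length_pyRange_one]
  · intro k h1 h2
    have hk : k < s.length - 1 := by
      simp [PySem.List.length_pyRange_one] at h1; omega
    simp only [List.getElem_map, PySem.List.getElem_pyRange_one, List.getElem_zip, List.getElem_tail]
    have e1 : (1 : Int) + (k : Int) - 1 = ((k : Nat) : Int) := by omega
    have e2 : (1 : Int) + (k : Int) = ((k + 1 : Nat) : Int) := by push_cast; ring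
    rw [e1, e2, PySem.List.pyGetD_natCast, PySem.List.pyGetD_natCast]
    simp [List.getD_eq_getElem?_getD, List.getElem?_eq_getElem (by omega : k < s.length),
      List.getElem?_eq_getElem (by omega : k + 1 < s.length)]

lemma pv_foldlA (w : Int) (xs : List (Int × Int × Int × Int)) :
    ∀ (prev : Int × Int × Int × Int) (lanes : List (List (Int × Int × Int × Int))) (cur : List (Int × Int × Int × Int)),
    (let r := ((prev :: xs).zip xs).foldl
        (fun st p => if |pvCenter p.2 - pvCenter p.1| < (w : ℚ) / 8
                     then (st.1, st.2 ++ [p.2]) else (st.1 ++ [st.2], [p.2]))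
        (lanes, cur);
     r.1 ++ [r.2]) = lanes ++ pvGo w prev cur xs := by
  induction xs with
  | nil => intro prev lanes cur; simp [pvGo]
  | cons y ys ih =>
    intro prev lanes cur
    simp only [List.zip_cons_cons, List.foldl_cons]
    by_cases hb : pvBrk w prev y
    · have hc : ¬ (|pvCenter y - pvCenter prev| < (w : ℚ) / 8) := by
        simp [pvBrk] at hb; exact not_lt.mpr hb
      rw [if_neg hc, ih y (lanes ++ [cur]) [y]]
      simp [pvGo, hb]
    · have hc : |pvCenter y - pvCenter prev| < (w : ℚ) / 8 := by
        simp [pvBrk] at hb; exact hb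
      rw [if_pos hc, ih y lanes (cur ++ [y])]
      simp [pvGo, hb]

lemma pvGo_cons (w : Int) (rest : List (Int × Int × Int × Int)) :
    ∀ (prev a : Int × Int × Int × Int) (cur : List (Int × Int × Int × Int)),
    pvGo w prev (a :: cur) rest =
      (match pvGo w prev cur rest with
       | g :: gs => (a :: g) :: gs
       | [] => [[a]]) := by
  induction rest with
  | nil => intro prev a cur; simp [pvGo]
  | cons y ys ih =>
    intro prev a cur
    by_cases hb : pvBrk w prev y
    · simp [pvGo, hb]
    · simp only [pvGo, hb, List.cons_append]
      exact ih y a (cur ++ [y])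

lemma pv_foldrB (w : Int) (xs : List (Int × Int × Int × Int)) :
    ∀ (x : Int × Int × Int × Int),
    ((x :: xs).zip (((x :: xs).zip xs).map (fun p => pvBrk w p.1 p.2) ++ [true])).foldr
      (fun p lanes =>
        if p.2 then [p.1] :: lanes
        else match lanes with
          | g :: gs => (p.1 :: g) :: gs
          | [] => [[p.1]]) [] = pvGo w x [x] xs := by
  induction xs with
  | nil => intro x; simp [pvGo]
  | cons x1 xs' ih =>
    intro x
    simp only [List.zip_cons_cons, List.map_cons, List.cons_append, List.foldr_cons]
    rw [ih x1]
    by_cases hb : pvBrk w x x1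
    · simp [pvGo, hb]
    · simp only [hb, pvGo]
      rw [show ([x] ++ [x1] : List (Int × Int × Int × Int)) = x :: [x1] from rfl]
      rw [pvGo_cons w xs' x1 x [x1]]

-- ===== VERDICT (by name: the statement is the Claim_ definition above) =====
theorem group_lines_spec : Claim_equal_group_lines := by
  intro lines w _
  show group_lines lines w = group_lines_alt lines w
  by_cases h : lines = []
  · simp [group_lines, group_lines_alt, h]
  · have hs : PySem.List.sorted lines pvCenter ≠ [] := by
      simpa [PySem.List.sorted_eq_nil_iff] using h
    obtain ⟨x, xs, hx⟩ := List.exists_cons_of_ne_nil hs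
    unfold group_lines group_lines_alt
    simp only [if_neg h]
    rw [show (PySem.List.pyRange 1 ((PySem.List.sorted lines pvCenter).length : Int) 1).foldl
          (fun (st : List (List (Int × Int × Int × Int)) × List (Int × Int × Int × Int)) i =>
            let line := PySem.List.pyGetD (PySem.List.sorted lines pvCenter) i (0, 0, 0, 0)
            let prev_line := PySem.List.pyGetD (PySem.List.sorted lines pvCenter) (i - 1) (0, 0, 0, 0)
            let distance := |pvCenter line - pvCenter prev_line|
            if distance < (w : ℚ) / 8 then (st.1, st.2 ++ [line])
            else (st.1 ++ [st.2], [line]))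
          ([], [PySem.List.pyGetD (PySem.List.sorted lines pvCenter) 0 (0, 0, 0, 0)])
        = ((PySem.List.sorted lines pvCenter).zip (PySem.List.sorted lines pvCenter).tail).foldl
            (fun st p => if |pvCenter p.2 - pvCenter p.1| < (w : ℚ) / 8
                         then (st.1, st.2 ++ [p.2]) else (st.1 ++ [st.2], [p.2]))
            ([], [PySem.List.pyGetD (PySem.List.sorted lines pvCenter) 0 (0, 0, 0, 0)])
        from by rw [← pv_map_range (PySem.List.sorted lines pvCenter) (0,0,0,0), List.foldl_map]]
    rw [hx]
    have h0 : PySem.List.pyGetD (x :: xs) (0 : Int) (0, 0, 0, 0) = x := by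
      simp [PySem.List.pyGetD_zero_cons]
    rw [h0]
    have hA := pv_foldlA w xs x [] [x]
    simp only [List.tail_cons] at *
    calc _ = [] ++ pvGo w x [x] xs := by
            simpa using hA
      _ = _ := by rw [pv_foldrB w xs x]; simp
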